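-- pv_equiv track=rewrite | github.com/JingPoo/Advanced-Computer-Algorithms | DFSAllPermutation.py | completeTime
-- ===== SOURCE A (Python) =====
-- def completeTime(jobs):
--     totalt = 0 # sum of completion time
--     currt = 0 #current time
--     for i in range(len(jobs)):
--         if currt < rj[jobs[i]-1]: #if current time is smaller than job arrival time
--             currt = rj[jobs[i]-1]
--         totalt += (currt + pj[jobs[i]-1]) - rj[jobs[i]-1]
--         currt += pj[jobs[i]-1]
--     return totalt
--
-- rj = [0,2,2,6,7,9]
--
-- pj = [6,2,3,2,5,2]
-- ===== SOURCE B (Python) =====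
-- rj = [0,2,2,6,7,9]
--
-- pj = [6,2,3,2,5,2]
--
-- def completeTime(jobs):
--     # Closed-form max-plus expansion: the completion time of the i-th scheduled job
--     # is max over restart points k <= i of (arrival of job k + processing of jobs k..i);
--     # the machine-idle recurrence is replaced by this direct per-position formula.
--     # Valid because every release time in rj is nonnegative.
--     r = [rj[j - 1] for j in jobs]
--     p = [pj[j - 1] for j in jobs]
--     total = 0
--     for i in range(len(jobs)):
--         comp = max(r[k] + sum(p[k:i + 1]) for k in range(i + 1))
--         total += comp - r[i]
--     return total
-- ===== Notes on version B (the rewrite author's own statement) =====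
-- stated objective: alternative
-- what changed: Replaces A's running-clock recurrence (currt = max(currt, release) + processing carried across the loop) by the closed-form max-plus expansion: each job's completion time is computed independently as the max over restart points k of (release of job k + processing of jobs k..i), summed in an outer loop; correct because all release times are nonnegative.
import Mathlib
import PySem

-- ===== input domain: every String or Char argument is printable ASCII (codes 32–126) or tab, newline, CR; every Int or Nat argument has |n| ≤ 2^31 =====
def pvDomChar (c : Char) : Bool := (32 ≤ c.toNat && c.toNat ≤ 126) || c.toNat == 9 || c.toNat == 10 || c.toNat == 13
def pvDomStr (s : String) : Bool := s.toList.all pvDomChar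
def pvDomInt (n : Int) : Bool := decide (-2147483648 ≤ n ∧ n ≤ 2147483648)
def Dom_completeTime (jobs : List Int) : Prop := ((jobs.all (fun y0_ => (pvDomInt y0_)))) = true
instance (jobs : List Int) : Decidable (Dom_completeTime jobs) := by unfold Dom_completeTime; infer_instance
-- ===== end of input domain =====

-- B replaces A's idle-time recurrence by the closed-form max-plus expansion: the completion
-- time of the i-th scheduled job is computed directly as the max over restart points k ≤ i of
-- (release of job k + total processing of jobs k..i); alternative algorithm, same return value.

-- ===== PORT A =====
def rjA : List Int := [0, 2, 2, 6, 7, 9]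
def pjA : List Int := [6, 2, 3, 2, 5, 2]

-- single loop carrying (totalt, currt); rj/pj indexing via pyGet? (Python negative-index rule),
-- getD 0 is never taken under Pre_ (which excludes the IndexError inputs)
def completeTime (jobs : List Int) : Int :=
  (jobs.foldl (fun (st : Int × Int) j =>
      let r := (PySem.List.pyGet? rjA (j - 1)).getD 0
      let p := (PySem.List.pyGet? pjA (j - 1)).getD 0
      let currt := if st.2 < r then r else st.2
      (st.1 + (currt + p) - r, currt + p)) (0, 0)).1

-- ===== PORT B =====
def rjB : List Int := [0, 2, 2, 6, 7, 9]
def pjB : List Int := [6, 2, 3, 2, 5, 2]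

-- per-position closed form: comp i = max(r[k] + sum(p[k:i+1]) for k in range(i+1))
def completeTime_alt (jobs : List Int) : Int :=
  let r := jobs.map (fun j => (PySem.List.pyGet? rjB (j - 1)).getD 0)
  let p := jobs.map (fun j => (PySem.List.pyGet? pjB (j - 1)).getD 0)
  (List.range jobs.length).foldl (fun total i =>
    let comp := (PySem.List.max? ((List.range (i + 1)).map
        (fun k => r.getD k 0 + (PySem.List.slice p (some (k : Int)) (some ((i : Int) + 1))).sum))
        (fun y => y)).getD 0
    total + comp - r.getD i 0) 0

-- ===== PRECONDITION & SPEC =====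
-- Pre_ excludes exactly the jobs whose index j-1 falls outside rj/pj (length 6,
-- Python negative indexing), where A raises IndexError (as does B).
def Pre_completeTime (jobs : List Int) : Prop :=
  ∀ j ∈ jobs, -5 ≤ j ∧ j ≤ 6
instance (jobs : List Int) : Decidable (Pre_completeTime jobs) := by
  unfold Pre_completeTime; infer_instance
def pvWitness_completeTime : List Int := [1, 2, 3, 6, -1]

def Spec_completeTime (jobs : List Int) (out : Int) : Prop := out = completeTime_alt jobs
instance (jobs : List Int) (out : Int) : Decidable (Spec_completeTime jobs out) := by
  unfold Spec_completeTime; infer_instance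

-- ===== CLAIM (what is proved, stated in full; the proofs are below) =====
def Claim_equal_completeTime : Prop := ∀ (jobs : List Int), Dom_completeTime jobs → Pre_completeTime jobs → Spec_completeTime jobs (completeTime jobs)

-- ===== LEMMAS AND PROOFS =====

-- A's step on an (r, p) pair
def stepA (st : Int × Int) (x : Int × Int) : Int × Int :=
  let currt := if st.2 < x.1 then x.1 else st.2
  (st.1 + (currt + x.2) - x.1, currt + x.2)

-- B's completion value at position i over release/processing lists r, p
def compB (r p : List Int) (i : Nat) : Int :=
  (PySem.List.max? ((List.range (i + 1)).map
      (fun k => r.getD k 0 + ((p.drop k).take (i + 1 - k)).sum)) (fun y => y)).getD 0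

-- generalised completion including the machine-available-at-c0 candidate
def compFrom (c0 : Int) (r p : List Int) (i : Nat) : Int :=
  max (c0 + (p.take (i + 1)).sum) (compB r p i)

theorem foldl_max_comm (t : List Int) : ∀ a c : Int, t.foldl max (max a c) = max a (t.foldl max c) := by
  induction t with
  | nil => intro a c; rfl
  | cons x xs ih => intro a c; simp only [List.foldl_cons, max_assoc, ih]

theorem compB_cons (r0 p0 : Int) (r p : List Int) (i : Nat) :
    compB (r0 :: r) (p0 :: p) (i + 1) = max (r0 + p0 + (p.take (i + 1)).sum) (compB r p i) := by
  have hc : (List.range (i + 1 + 1)).map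
        (fun k => (r0 :: r).getD k 0 + (((p0 :: p).drop k).take (i + 1 + 1 - k)).sum)
      = (r0 + p0 + (p.take (i + 1)).sum)
        :: (List.range (i + 1)).map (fun k => r.getD k 0 + ((p.drop k).take (i + 1 - k)).sum) := by
    rw [List.range_succ_eq_map]
    simp only [List.map_cons, List.map_map]
    refine List.cons_eq_cons.mpr ⟨?_, ?_⟩
    · simp [add_assoc]
    · apply List.map_congr_left
      intro k _
      simp [Nat.succ_sub_succ]
  obtain ⟨c, t, hct⟩ : ∃ c t, (List.range (i + 1)).map
      (fun k => r.getD k 0 + ((p.drop k).take (i + 1 - k)).sum) = c :: t := by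
    rw [List.range_succ_eq_map, List.map_cons, List.map_map]
    exact ⟨_, _, rfl⟩
  unfold compB
  rw [hc, hct, PySem.List.max?_id_cons, PySem.List.max?_id_cons]
  simp only [Option.getD_some, List.foldl_cons]
  rw [foldl_max_comm]

theorem compB_zero (r0 p0 : Int) (r p : List Int) :
    compB (r0 :: r) (p0 :: p) 0 = r0 + p0 := by
  unfold compB
  rw [show List.range (0 + 1) = [0] from rfl]
  simp only [List.map_cons, List.map_nil, PySem.List.max?_id_cons, List.foldl_nil, Option.getD_some]
  simp

theorem compFrom_cons (c0 r0 p0 : Int) (r p : List Int) (i : Nat) :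
    compFrom c0 (r0 :: r) (p0 :: p) (i + 1) = compFrom (max c0 r0 + p0) r p i := by
  unfold compFrom
  rw [compB_cons]
  simp only [List.take_succ_cons, List.sum_cons]
  rw [← max_assoc]
  congr 1
  rw [show c0 + (p0 + (List.take (i + 1) p).sum) = c0 + ((p0 + (List.take (i + 1) p).sum))
        from rfl,
      show r0 + p0 + (List.take (i + 1) p).sum = r0 + (p0 + (List.take (i + 1) p).sum) by ring,
      max_add_add_right]
  ring

-- the head candidate (k = 0) bounds compB from below
theorem compB_ge_head (r p : List Int) (i : Nat) :
    r.getD 0 0 + (p.take (i + 1)).sum ≤ compB r p i := by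
  have hb : (List.range (i + 1)).map
      (fun k => r.getD k 0 + ((p.drop k).take (i + 1 - k)).sum)
      = (r.getD 0 0 + (p.take (i + 1)).sum)
        :: (List.range i).map (fun k => r.getD (k + 1) 0 + ((p.drop (k + 1)).take (i + 1 - (k + 1))).sum) := by
    rw [List.range_succ_eq_map]
    simp [List.map_map, Function.comp]
  unfold compB
  rw [hb, PySem.List.max?_id_cons, Option.getD_some]
  exact (PySem.List.le_foldl_max _ _).1

theorem compFrom_zero (r p : List Int) (h : 0 ≤ r.getD 0 0) (i : Nat) :
    compFrom 0 r p i = compB r p i := by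
  unfold compFrom
  have := compB_ge_head r p i
  have : (p.take (i + 1)).sum ≤ compB r p i := by linarith
  simp [this]

-- main invariant: A's fold over (r,p) pairs equals B's range-fold with compFrom c0
theorem main_fold (r : List Int) : ∀ (p : List Int), r.length = p.length → ∀ (c0 t : Int),
    ((r.zip p).foldl stepA (t, c0)).1
      = (List.range r.length).foldl
          (fun total i => total + compFrom c0 r p i - r.getD i 0) t := by
  induction r with
  | nil => intro p _ c0 t; simp
  | cons r0 rt ih =>
    intro p hlen c0 t
    cases p with
    | nil => simp at hlen
    | cons p0 pt =>
      simp only [List.length_cons, Nat.succ.injEq] at hlen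
      have hstep : stepA (t, c0) (r0, p0)
          = (t + (max c0 r0 + p0) - r0, max c0 r0 + p0) := by
        unfold stepA
        rcases lt_or_ge c0 r0 with h | h
        · simp [h, max_eq_right (le_of_lt h)]
        · simp [not_lt.mpr h, max_eq_left h]
      rw [List.zip_cons_cons, List.foldl_cons, hstep, ih pt hlen]
      rw [List.length_cons, List.range_succ_eq_map, List.foldl_cons, List.foldl_map]
      have h0 : compFrom c0 (r0 :: rt) (p0 :: pt) 0 = max c0 r0 + p0 := by
        unfold compFrom
        rw [compB_zero]
        simp only [List.take_succ_cons, List.take_zero, List.sum_cons, List.sum_nil, add_zero]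
        rw [max_add_add_right]
      have hfun : (fun (total : Int) (i : Nat) =>
            total + compFrom c0 (r0 :: rt) (p0 :: pt) (i + 1) - (r0 :: rt).getD (i + 1) 0)
          = (fun (total : Int) (i : Nat) => total + compFrom (max c0 r0 + p0) rt pt i - rt.getD i 0) := by
        funext total i
        rw [compFrom_cons]
        simp
      simp only [List.getD_cons_zero, h0, hfun, hlen]

-- ===== VERDICT (by name: the statement is the Claim_ definition above) =====
theorem completeTime_spec : Claim_equal_completeTime := by
  intro jobs _ _
  unfold Spec_completeTime completeTime completeTime_alt
  have hrj : rjA = rjB := rfl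
  have hpj : pjA = pjB := rfl
  set fr : Int → Int := fun j => (PySem.List.pyGet? rjB (j - 1)).getD 0 with hfr
  set fp : Int → Int := fun j => (PySem.List.pyGet? pjB (j - 1)).getD 0 with hfp
  set r : List Int := jobs.map fr with hr
  set p : List Int := jobs.map fp with hp
  -- A's fold over jobs = fold of stepA over (r.zip p)
  have hA : (jobs.foldl (fun (st : Int × Int) j =>
        let rv := (PySem.List.pyGet? rjA (j - 1)).getD 0
        let pv := (PySem.List.pyGet? pjA (j - 1)).getD 0
        let currt := if st.2 < rv then rv else st.2
        (st.1 + (currt + pv) - rv, currt + pv)) (0, 0)).1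
      = ((r.zip p).foldl stepA (0, 0)).1 := by
    rw [hr, hp, List.zip_map', List.foldl_map]
    rfl
  rw [hA, main_fold r p (by simp [hr, hp]) 0 0]
  -- positivity of the head release time
  have hpos : 0 ≤ r.getD 0 0 := by
    cases jobs with
    | nil => simp [hr]
    | cons j js =>
      simp only [hr, List.map_cons, List.getD_cons_zero, hfr]
      cases hg : PySem.List.pyGet? rjB (j - 1) with
      | none => simp
      | some v =>
        have hv := PySem.List.mem_of_pyGet?_eq_some rjB hg
        simp only [Option.getD_some]
        fin_cases hv <;> norm_num
  have hlen : r.length = jobs.length := by simp [hr]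
  have hslice : ∀ (k i : Nat),
      (PySem.List.slice p (some (k : Int)) (some ((i : Int) + 1))).sum
        = ((p.drop k).take (i + 1 - k)).sum := by
    intro k i
    have : ((i : Int) + 1) = ((i + 1 : Nat) : Int) := by push_cast; ring
    rw [this, PySem.List.slice_natCast]
  simp only [hlen]
  apply PySem.List.foldl_congr_mem
  intro total i _
  rw [compFrom_zero r p hpos i]
  unfold compB
  have hm : (List.range (i + 1)).map
        (fun k => r.getD k 0 + (PySem.List.slice p (some (k : Int)) (some ((i : Int) + 1))).sum)
      = (List.range (i + 1)).map
        (fun k => r.getD k 0 + ((p.drop k).take (i + 1 - k)).sum) :=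
    List.map_congr_left (fun k _ => by rw [hslice])
  rw [hm]
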